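-- pv_equiv track=rewrite | github.com/DarioBernardo/hackerrank_exercises | lifespan.py | get_life_span
-- ===== SOURCE A (Python) =====
-- def get_life_span(data, threshold=3):
--     zeros_counter = 0
--     for i, elem in enumerate(data, 1):
--         if elem == 0:
--             zeros_counter += 1
--         else:
--             zeros_counter = 0
--
--         if zeros_counter == threshold:
--             return i, False
--
--     return len(data), True
-- ===== SOURCE B (Python) =====
-- def get_life_span(data, threshold=3):
--     n = len(data)
--     if threshold >= 1:
--         i = 0
--         while i < n:
--             if data[i] == 0:
--                 j = i
--                 while j < n and data[j] == 0:
--                     j += 1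
--                 if j - i >= threshold:
--                     return i + threshold, False
--                 i = j
--             else:
--                 i += 1
--     return n, True
-- ===== Notes on version B (the rewrite author's own statement) =====
-- stated objective: alternative
-- what changed: B replaces A's per-element trailing-zero counter with a run-skipping two-pointer scan: at each zero it measures the whole run at once, succeeds if the run reaches the threshold, otherwise jumps past the run.
-- intended difference: When threshold is 0 and data contains a nonzero element, A returns (1-based index of the first nonzero, False) — an accident of comparing the just-reset counter against 0 — while B returns (len(data), True), the intended 'no qualifying zero-run found' answer for a degenerate threshold. — e.g. on get_life_span([5], 0): A returns (1, false), B returns (1, true)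
import Mathlib
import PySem

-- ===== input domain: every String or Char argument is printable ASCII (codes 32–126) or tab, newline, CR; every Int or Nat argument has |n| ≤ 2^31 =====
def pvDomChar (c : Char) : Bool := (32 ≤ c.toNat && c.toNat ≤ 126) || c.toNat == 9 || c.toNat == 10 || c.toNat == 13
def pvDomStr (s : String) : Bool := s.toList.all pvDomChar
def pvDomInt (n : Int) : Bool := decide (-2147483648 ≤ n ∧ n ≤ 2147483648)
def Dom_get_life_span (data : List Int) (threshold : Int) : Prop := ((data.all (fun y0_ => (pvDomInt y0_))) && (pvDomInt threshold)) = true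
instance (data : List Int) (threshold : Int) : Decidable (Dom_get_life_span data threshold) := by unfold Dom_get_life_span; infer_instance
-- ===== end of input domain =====

-- B replaces A's per-element zero-counter with a run-skipping two-pointer scan (alternative
-- decomposition, same cost); for threshold = 0 with a nonzero present, B reports "no run found"
-- instead of A's accidental first-nonzero hit (see D_ below).

-- ===== PORT A =====
-- A's single pass: 1-based index i, trailing-zero counter c, return i when c hits threshold.
def aLoop (t : Int) : List Int → Int → Int → Option Int
  | [], _, _ => none
  | x :: xs, i, c =>
    let c' := if x = 0 then c + 1 else 0
    if c' = t then some i else aLoop t xs (i + 1) c'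

def get_life_span (data : List Int) (threshold : Int) : Int × Bool :=
  match aLoop threshold data 1 0 with
  | some i => (i, false)
  | none => ((data.length : Int), true)

-- ===== PORT B =====
-- length of the leading run of zeros (B's inner `while j < n and data[j] == 0` scan)
def zrun : List Int → Nat
  | [] => 0
  | x :: xs => if x = 0 then zrun xs + 1 else 0

-- B's outer loop: pos is the 0-based index of the current head; at a zero, measure the whole
-- run, succeed if long enough, otherwise skip past it.
def bLoop (t : Int) : List Int → Int → Option Int
  | [], _ => none
  | x :: xs, pos =>
    if x = 0 then
      let k : Nat := zrun xs + 1
      if t ≤ (k : Int) then some (pos + t)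
      else bLoop t (xs.drop (zrun xs)) (pos + (k : Int))
    else bLoop t xs (pos + 1)
termination_by l => l.length
decreasing_by
  · simp only [List.length_cons]; exact Nat.lt_succ_of_le (List.length_drop (l := xs) (i := zrun xs) ▸ Nat.sub_le _ _)
  · simp

def get_life_span_alt (data : List Int) (threshold : Int) : Int × Bool :=
  if 1 ≤ threshold then
    match bLoop threshold data 0 with
    | some i => (i, false)
    | none => ((data.length : Int), true)
  else ((data.length : Int), true)

-- ===== PRECONDITION & SPEC =====
-- When threshold = 0 and data contains a nonzero element, A returns (1-based index of the first
-- nonzero, False) — an accident of comparing the just-reset counter with 0 — while B returns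
-- (len(data), True), the intended "no qualifying run of zeros found" answer for a degenerate threshold.
def D_get_life_span (data : List Int) (threshold : Int) : Prop :=
  threshold = 0 ∧ ∃ x ∈ data, x ≠ 0
instance (data : List Int) (threshold : Int) : Decidable (D_get_life_span data threshold) := by
  unfold D_get_life_span; infer_instance

def Spec_get_life_span (data : List Int) (threshold : Int) (out : Int × Bool) : Prop :=
  ¬ D_get_life_span data threshold → out = get_life_span_alt data threshold
instance (data : List Int) (threshold : Int) (out : Int × Bool) : Decidable (Spec_get_life_span data threshold out) := by
  unfold Spec_get_life_span; infer_instance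

def pvDiffWitness_get_life_span : List Int × Int := ([5], 0)
def pvDiffWitnessOut_get_life_span : (Int × Bool) × (Int × Bool) := ((1, false), (1, true))

-- ===== CLAIM (what is proved, stated in full; the proofs are below) =====
def Claim_unchanged_get_life_span : Prop := ∀ (data : List Int) (threshold : Int), Dom_get_life_span data threshold → Spec_get_life_span data threshold (get_life_span data threshold)
def Claim_changed_get_life_span : Prop := Dom_get_life_span (pvDiffWitness_get_life_span.1) (pvDiffWitness_get_life_span.2) ∧ D_get_life_span (pvDiffWitness_get_life_span.1) (pvDiffWitness_get_life_span.2) ∧ get_life_span (pvDiffWitness_get_life_span.1) (pvDiffWitness_get_life_span.2) = pvDiffWitnessOut_get_life_span.1 ∧ get_life_span_alt (pvDiffWitness_get_life_span.1) (pvDiffWitness_get_life_span.2) = pvDiffWitnessOut_get_life_span.2 ∧ pvDiffWitnessOut_get_life_span.1 ≠ pvDiffWitnessOut_get_life_span.2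
def Claim_exact_get_life_span : Prop := ∀ (data : List Int) (threshold : Int), Dom_get_life_span data threshold → D_get_life_span data threshold → get_life_span data threshold ≠ get_life_span_alt data threshold

-- ===== LEMMAS AND PROOFS =====

-- inside a long-enough zero run A succeeds, returning the position where the counter reaches t
lemma aLoop_succeed (l : List Int) : ∀ (c pos t : Int), 0 ≤ c → c < t → t - c ≤ (zrun l : Int) →
    aLoop t l pos c = some (pos + (t - c) - 1) := by
  induction l with
  | nil => intro c pos t hc hct hz; simp [zrun] at hz; omega
  | cons x xs ih =>
    intro c pos t hc hct hz
    by_cases hx : x = 0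
    · simp only [zrun, hx, if_true] at hz
      push_cast at hz
      simp only [aLoop, hx, if_true]
      by_cases he : c + 1 = t
      · simp only [he, if_true]
        congr 1; omega
      · rw [if_neg he, ih (c + 1) (pos + 1) t (by omega) (by omega) (by omega)]
        congr 1; omega
    · simp [zrun, hx] at hz; omega

-- a too-short zero run is traversed by A without firing; counters never reach t
lemma aLoop_skip (l : List Int) : ∀ (c pos t : Int), (zrun l : Int) < t - c →
    aLoop t l pos c = aLoop t (l.drop (zrun l)) (pos + (zrun l : Int)) (c + (zrun l : Int)) := by
  induction l with
  | nil => intro c pos t _; simp [zrun]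
  | cons x xs ih =>
    intro c pos t hz
    by_cases hx : x = 0
    · simp only [zrun, hx, if_true] at hz ⊢
      push_cast at hz ⊢
      have hz1 : (0:Int) ≤ (zrun xs : Int) := by positivity
      simp only [aLoop, if_true, if_neg (show ¬ (c + 1 = t) by omega), List.drop_succ_cons]
      rw [ih (c + 1) (pos + 1) t (by omega)]
      congr 1 <;> omega
    · simp only [zrun, hx, if_false, Nat.cast_zero, List.drop_zero, add_zero]

-- after the leading zero run, either nothing is left or the next element is nonzero
lemma drop_zrun (l : List Int) : ∀ y ys, l.drop (zrun l) = y :: ys → y ≠ 0 := by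
  induction l with
  | nil => intro y ys h; simp [zrun] at h
  | cons x xs ih =>
    intro y ys h
    by_cases hx : x = 0
    · simp only [zrun, hx, if_true, List.drop_succ_cons] at h
      exact ih y ys h
    · simp only [zrun, hx, if_false, List.drop_zero] at h
      cases h; simpa using hx

-- main correspondence between A's counter scan and B's run scan, for threshold ≥ 1
lemma main_lemma : ∀ (n : Nat) (l : List Int), l.length ≤ n → ∀ (pos t : Int), 1 ≤ t →
    aLoop t l (pos + 1) 0 = bLoop t l pos := by
  intro n
  induction n with
  | zero =>
    intro l hl pos t _
    have : l = [] := List.eq_nil_of_length_eq_zero (by omega)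
    subst this; simp [aLoop, bLoop]
  | succ m ih =>
    intro l hl pos t ht
    match l with
    | [] => simp [aLoop, bLoop]
    | x :: xs =>
      by_cases hx : x = 0
      · subst hx
        rw [bLoop]
        simp only [if_true]
        by_cases hk : t ≤ ((zrun xs + 1 : Nat) : Int)
        · rw [if_pos hk]
          have := aLoop_succeed ((0:Int) :: xs) 0 (pos + 1) t (le_refl 0) (by omega)
            (by simp only [zrun, if_true]; push_cast at hk ⊢; omega)
          rw [this]; congr 1; omega
        · rw [if_neg hk]
          push_cast at hk
          have hz : (zrun ((0:Int) :: xs) : Int) < t - 0 := by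
            simp only [zrun, if_true]; push_cast; omega
          rw [aLoop_skip ((0:Int) :: xs) 0 (pos + 1) t hz]
          have hdrop : ((0:Int) :: xs).drop (zrun ((0:Int) :: xs)) = xs.drop (zrun xs) := by
            simp [zrun]
          rw [hdrop]
          have hcast : ((zrun ((0:Int) :: xs) : Nat) : Int) = (zrun xs : Int) + 1 := by
            simp [zrun]
          rw [hcast]
          match hr : xs.drop (zrun xs) with
          | [] => simp [aLoop, bLoop]
          | y :: ys =>
            have hy : y ≠ 0 := drop_zrun xs y ys hr
            rw [aLoop, bLoop]
            simp only [hy, if_false, if_neg (show ¬ (0:Int) = t by omega)]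
            have hlen : ys.length ≤ m := by
              have h1 : (y :: ys).length ≤ xs.length := hr ▸ List.length_drop ▸ Nat.sub_le _ _
              simp only [List.length_cons] at h1 hl
              omega
            rw [show pos + 1 + ((zrun xs : Int) + 1) + 1 = (pos + ((zrun xs : Int) + 1) + 1) + 1 by ring]
            exact ih ys hlen (pos + ((zrun xs : Int) + 1) + 1) t ht
      · rw [aLoop, bLoop]
        simp only [hx, if_false, if_neg (show ¬ (0:Int) = t by omega)]
        have hlen : xs.length ≤ m := by simpa using hl
        exact ih xs hlen (pos + 1) t ht

-- with a negative threshold the nonnegative counter never fires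
lemma aLoop_none_neg (l : List Int) : ∀ (c pos t : Int), 0 ≤ c → t < 0 → aLoop t l pos c = none := by
  induction l with
  | nil => intro c pos t _ _; rfl
  | cons x xs ih =>
    intro c pos t hc ht
    by_cases hx : x = 0
    · simp only [aLoop, hx, if_true, if_neg (show ¬ (c + 1 = t) by omega)]
      exact ih (c + 1) (pos + 1) t (by omega) ht
    · simp only [aLoop, hx, if_false, if_neg (show ¬ (0:Int) = t by omega)]
      exact ih 0 (pos + 1) t le_rfl ht

-- threshold 0, all elements zero: the counter stays positive and never equals 0
lemma aLoop_none_zero (l : List Int) : ∀ (c pos : Int), 0 ≤ c → (∀ x ∈ l, x = 0) →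
    aLoop 0 l pos c = none := by
  induction l with
  | nil => intro c pos _ _; rfl
  | cons x xs ih =>
    intro c pos hc hall
    have hx : x = 0 := hall x (by simp)
    simp only [aLoop, hx, if_true, if_neg (show ¬ (c + 1 = 0) by omega)]
    exact ih (c + 1) (pos + 1) (by omega) (fun y hy => hall y (by simp [hy]))

-- threshold 0 with a nonzero present: A fires at the first nonzero element
lemma aLoop_some_t0 (l : List Int) : ∀ (c pos : Int), 0 ≤ c → (∃ x ∈ l, x ≠ 0) →
    ∃ i, aLoop 0 l pos c = some i := by
  induction l with
  | nil => intro c pos _ h; simp at h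
  | cons x xs ih =>
    intro c pos hc hex
    by_cases hx : x = 0
    · simp only [aLoop, hx, if_true, if_neg (show ¬ (c + 1 = 0) by omega)]
      refine ih (c + 1) (pos + 1) (by omega) ?_
      obtain ⟨y, hy, hy0⟩ := hex
      rcases List.mem_cons.mp hy with h | h
      · rw [h] at hy0; exact (hy0 hx).elim
      · exact ⟨y, h, hy0⟩
    · exact ⟨pos, by simp [aLoop, hx]⟩

-- ===== VERDICT (by name: the statement is the Claim_ definition above) =====
theorem get_life_span_spec : Claim_unchanged_get_life_span := by
  intro data threshold _ hnd
  show get_life_span data threshold = get_life_span_alt data threshold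
  by_cases ht : 1 ≤ threshold
  · unfold get_life_span get_life_span_alt
    rw [if_pos ht, show (1:Int) = 0 + 1 from (zero_add 1).symm,
        main_lemma data.length data le_rfl 0 threshold ht]
  · unfold D_get_life_span at hnd
    simp only [not_and, not_exists, not_not] at hnd
    unfold get_life_span get_life_span_alt
    rw [if_neg ht]
    by_cases h0 : threshold = 0
    · subst h0
      have hall : ∀ x ∈ data, x = 0 := by
        intro x hx
        by_contra hne
        exact hne (by simpa using hnd rfl x hx)
      rw [aLoop_none_zero data 0 1 le_rfl hall]
    · rw [aLoop_none_neg data 0 1 threshold le_rfl (by omega)]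

theorem get_life_span_changed : Claim_changed_get_life_span := by
  unfold Claim_changed_get_life_span; decide

theorem get_life_span_tight : Claim_exact_get_life_span := by
  intro data threshold _ hd
  obtain ⟨ht, hex⟩ := hd
  subst ht
  obtain ⟨i, hi⟩ := aLoop_some_t0 data 0 1 le_rfl hex
  unfold get_life_span get_life_span_alt
  rw [hi, if_neg (by omega)]
  simp
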